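-- pv_equiv track=rewrite | github.com/jaswanreddy1729/flames-calculator | main.py | vlistChar
-- ===== SOURCE A (Python) =====
-- class InvalidName(Exception):  #Error code
--     def __init__(self,message):
--         self.message=message
--
-- def vlistChar(x): #making a list of all characters in the name.
--     l=[]
--     for i in x:
--         if (ord(i) >= 97 and ord(i) <= 122) or (ord(i) >= 65 and ord(i) <= 90 ):
--             l.append(i.lower())
--         elif(i==' '):
--             pass
--         else:
--             raise InvalidName("Please enter a valid name.")
--     return l
-- ===== SOURCE B (Python) =====
-- class InvalidName(Exception):
--     def __init__(self, message):
--         self.message = message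
--
-- def vlistChar(x):
--     # Word-level algorithm: split on spaces, validate whole words with str methods,
--     # then rebuild via join/lower and explode into a character list.
--     words = x.split(' ')
--     for w in words:
--         if w and not (w.isascii() and w.isalpha()):
--             raise InvalidName("Please enter a valid name.")
--     return list(''.join(words).lower())
-- ===== Notes on version B (the rewrite author's own statement) =====
-- stated objective: alternative
-- what changed: Replaced A's single per-character loop (ord() range checks, conditional append) by a word-level algorithm: split the string on spaces, validate each whole word with w.isascii() and w.isalpha(), then rebuild the result with ''.join(words).lower() exploded into a character list.
import Mathlib
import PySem

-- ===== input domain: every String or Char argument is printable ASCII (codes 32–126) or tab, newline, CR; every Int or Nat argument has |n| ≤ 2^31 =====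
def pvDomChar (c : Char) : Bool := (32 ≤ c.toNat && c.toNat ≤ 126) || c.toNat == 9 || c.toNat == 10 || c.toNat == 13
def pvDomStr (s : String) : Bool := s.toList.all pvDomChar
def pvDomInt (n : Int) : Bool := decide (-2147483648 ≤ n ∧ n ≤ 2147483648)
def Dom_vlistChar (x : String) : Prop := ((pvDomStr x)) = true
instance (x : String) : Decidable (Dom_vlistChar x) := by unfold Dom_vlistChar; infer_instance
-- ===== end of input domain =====

-- B replaces A's per-character validate-and-append loop by a word-level algorithm:
-- split on spaces, validate whole words with string predicates, then join/lower and
-- explode into the character list; same return value wherever A returns (Pre_ excludes raises).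

-- ===== PORT A =====
-- A's loop: accumulate the list; the `else` branch raises (modelled as `none`); Pre_ excludes it.
def vlistCharLoop : List Char → List String → Option (List String)
  | [], l => some l
  | i :: rest, l =>
    if (97 ≤ i.toNat ∧ i.toNat ≤ 122) ∨ (65 ≤ i.toNat ∧ i.toNat ≤ 90) then
      vlistCharLoop rest (l ++ [String.mk [PySem.Chars.lowerChar i]])
    else if i = ' ' then
      vlistCharLoop rest l
    else
      none  -- raise InvalidName

def vlistChar (x : String) : List String :=
  (vlistCharLoop x.toList []).getD []

-- ===== PORT B =====
-- words = x.split(' '); validate each word (raise modelled as the `else` branch, excluded by Pre_);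
-- then list(''.join(words).lower()).
def vlistChar_alt (x : String) : List String :=
  if (PySem.Chars.splitOn x.toList [' ']).all
      (fun w => w.isEmpty || (w.all (fun c => decide (c.toNat ≤ 127)) && PySem.Chars.strIsalpha w)) then
    (PySem.Chars.lower (PySem.Chars.join [] (PySem.Chars.splitOn x.toList [' ']))).map (fun c => String.mk [c])
  else
    []  -- raise InvalidName (excluded by Pre_)

-- ===== PRECONDITION & SPEC =====
-- Pre_ excludes exactly the inputs containing a character that is neither a space nor an
-- ASCII letter: there A (and B) raise InvalidName.
def Pre_vlistChar (x : String) : Prop :=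
  (x.toList.all (fun c => decide (c = ' ' ∨ (97 ≤ c.toNat ∧ c.toNat ≤ 122) ∨ (65 ≤ c.toNat ∧ c.toNat ≤ 90)))) = true
instance (x : String) : Decidable (Pre_vlistChar x) := by unfold Pre_vlistChar; infer_instance
def pvWitness_vlistChar : String := ("ab")

def Spec_vlistChar (x : String) (out : List String) : Prop := out = vlistChar_alt x
instance (x : String) (out : List String) : Decidable (Spec_vlistChar x out) := by unfold Spec_vlistChar; infer_instance

-- ===== CLAIM (what is proved, stated in full; the proofs are below) =====
def Claim_equal_vlistChar : Prop := ∀ (x : String), Dom_vlistChar x → Pre_vlistChar x → Spec_vlistChar x (vlistChar x)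

-- ===== LEMMAS AND PROOFS =====

-- simple structural model of splitting a char list on single spaces (proof-side only)
def pvSplitSp (cur : List Char) : List Char → List (List Char)
  | [] => [cur]
  | c :: rest => if c = ' ' then cur :: pvSplitSp [] rest else pvSplitSp (cur ++ [c]) rest

lemma pvSplitSp_go (l : List Char) : ∀ (fuel : Nat) (cur : List Char) (acc : List (List Char)),
    l.length < fuel →
    PySem.Chars.splitOn.go [' '] fuel l cur acc = acc.reverse ++ pvSplitSp cur.reverse l := by
  induction l with
  | nil =>
    intro fuel cur acc h
    match fuel with
    | fuel + 1 => simp [PySem.Chars.splitOn.go, pvSplitSp]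
  | cons c rest ih =>
    intro fuel cur acc h
    match fuel with
    | fuel + 1 =>
      by_cases hc : c = ' '
      · subst hc
        rw [show PySem.Chars.splitOn.go [' '] (fuel+1) (' ' :: rest) cur acc
              = PySem.Chars.splitOn.go [' '] fuel rest [] (cur.reverse :: acc) by
            simp [PySem.Chars.splitOn.go, List.isPrefixOf]]
        rw [ih fuel [] (cur.reverse :: acc) (by simpa using Nat.lt_of_succ_lt_succ h)]
        simp [pvSplitSp]
      · rw [show PySem.Chars.splitOn.go [' '] (fuel+1) (c :: rest) cur acc
              = PySem.Chars.splitOn.go [' '] fuel rest (c :: cur) acc by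
            simp [PySem.Chars.splitOn.go, List.isPrefixOf, Ne.symm hc]]
        rw [ih fuel (c :: cur) acc (by simpa using Nat.lt_of_succ_lt_succ h)]
        simp [pvSplitSp, hc]

lemma splitOn_eq_pvSplitSp (s : List Char) :
    PySem.Chars.splitOn s [' '] = pvSplitSp [] s := by
  unfold PySem.Chars.splitOn
  rw [pvSplitSp_go s (s.length + 1) [] [] (Nat.lt_succ_self _)]
  simp

lemma pvSplitSp_flatten (l : List Char) : ∀ cur,
    (pvSplitSp cur l).flatten = cur ++ l.filter (fun c => decide (c ≠ ' ')) := by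
  induction l with
  | nil => intro cur; simp [pvSplitSp]
  | cons c rest ih =>
    intro cur
    by_cases hc : c = ' '
    · subst hc; simp [pvSplitSp, ih]
    · simp [pvSplitSp, hc, ih]

lemma pvSplitSp_mem (l : List Char) : ∀ cur w, w ∈ pvSplitSp cur l →
    ∀ c ∈ w, c ∈ cur ∨ (c ∈ l ∧ c ≠ ' ') := by
  induction l with
  | nil =>
    intro cur w hw c hc
    simp [pvSplitSp] at hw; subst hw; exact Or.inl hc
  | cons a rest ih =>
    intro cur w hw c hc
    by_cases ha : a = ' '
    · subst ha
      simp [pvSplitSp] at hw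
      rcases hw with hw | hw
      · subst hw; exact Or.inl hc
      · rcases ih [] w hw c hc with h | h
        · simp at h
        · exact Or.inr ⟨by simp [h.1], h.2⟩
    · simp [pvSplitSp, ha] at hw
      rcases ih (cur ++ [a]) w hw c hc with h | h
      · rcases List.mem_append.mp h with h | h
        · exact Or.inl h
        · simp at h; subst h; exact Or.inr ⟨by simp, ha⟩
      · exact Or.inr ⟨by simp [h.1], h.2⟩

lemma join_nil_flatten (ps : List (List Char)) : PySem.Chars.join [] ps = ps.flatten := by
  unfold PySem.Chars.join
  simp only [List.intercalate]
  induction ps with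
  | nil => simp
  | cons p ps ih =>
    cases ps with
    | nil => simp [List.intersperse]
    | cons q qs => simp [List.intersperse] at ih ⊢; simpa using ih

-- A's loop appends the lowercased non-space characters in order
lemma vlistCharLoop_inv (cs : List Char)
    (h : ∀ c ∈ cs, c = ' ' ∨ (97 ≤ c.toNat ∧ c.toNat ≤ 122) ∨ (65 ≤ c.toNat ∧ c.toNat ≤ 90)) (l : List String) :
    vlistCharLoop cs l =
      some (l ++ (cs.filter (fun c => decide (c ≠ ' '))).map (fun c => String.mk [PySem.Chars.lowerChar c])) := by
  induction cs generalizing l with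
  | nil => simp [vlistCharLoop]
  | cons i rest ih =>
    have hi := h i (by simp)
    have hrest : ∀ c ∈ rest, c = ' ' ∨ (97 ≤ c.toNat ∧ c.toNat ≤ 122) ∨ (65 ≤ c.toNat ∧ c.toNat ≤ 90) :=
      fun c hc => h c (by simp [hc])
    rcases hi with hs | hl
    · subst hs
      simp [vlistCharLoop, ih hrest]
    · have hc : (97 ≤ i.toNat ∧ i.toNat ≤ 122) ∨ (65 ≤ i.toNat ∧ i.toNat ≤ 90) := by
        rcases hl with h1 | h1
        · exact Or.inl h1
        · exact Or.inr h1
      have hne : ¬ (i = ' ') := by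
        intro hEq; subst hEq
        rcases hl with h1 | h1 <;> simp_all
      simp [vlistCharLoop, hc, ih hrest, hne]

-- char-order ↔ code-point bridge
lemma char_le_iff (a b : Char) : a ≤ b ↔ a.toNat ≤ b.toNat := by
  rw [Char.le_def]
  exact UInt32.le_iff_toNat_le

-- ===== VERDICT (by name: the statement is the Claim_ definition above) =====
theorem vlistChar_spec : Claim_equal_vlistChar := by
  intro x _ hpre0
  have hpre : ∀ c ∈ x.toList, c = ' ' ∨ (97 ≤ c.toNat ∧ c.toNat ≤ 122) ∨ (65 ≤ c.toNat ∧ c.toNat ≤ 90) := by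
    intro c hc
    exact of_decide_eq_true ((List.all_eq_true.mp hpre0) c hc)
  unfold Spec_vlistChar vlistChar vlistChar_alt
  rw [vlistCharLoop_inv x.toList hpre []]
  rw [splitOn_eq_pvSplitSp]
  have hvalid : (pvSplitSp [] x.toList).all
      (fun w => w.isEmpty || (w.all (fun c => decide (c.toNat ≤ 127)) && PySem.Chars.strIsalpha w)) = true := by
    rw [List.all_eq_true]
    intro w hw
    by_cases hwe : w = []
    · simp [hwe]
    · have hletter : ∀ c ∈ w, (97 ≤ c.toNat ∧ c.toNat ≤ 122) ∨ (65 ≤ c.toNat ∧ c.toNat ≤ 90) := by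
        intro c hc
        rcases pvSplitSp_mem x.toList [] w hw c hc with h | h
        · simp at h
        · rcases hpre c h.1 with hs | hl
          · exact absurd hs h.2
          · exact hl
      simp only [Bool.or_eq_true, Bool.and_eq_true, List.all_eq_true]
      right
      refine ⟨fun c hc => by rcases hletter c hc with h | h <;> simp <;> omega, ?_⟩
      unfold PySem.Chars.strIsalpha
      rw [Bool.and_eq_true, List.all_eq_true]
      refine ⟨by simp [hwe], fun c hc => ?_⟩
      unfold PySem.Chars.isalpha PySem.Chars.isupper PySem.Chars.islower
      rcases hletter c hc with h | h
      · simp [char_le_iff]; omega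
      · simp [char_le_iff]; omega
  rw [hvalid]
  simp only [join_nil_flatten, pvSplitSp_flatten, List.nil_append]
  unfold PySem.Chars.lower
  simp [List.map_map, Function.comp]
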